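-- pv_equiv track=rewrite | github.com/meridianlabs-ai/inspect_flow | src/inspect_flow/_launcher/freeze.py | _deduplicate_freeze_requirements
-- ===== SOURCE A (Python) =====
-- def _deduplicate_freeze_requirements(freeze_output: str) -> str:
--     """Deduplicate package entries in freeze output, keeping the most specific URL."""
--     lines = freeze_output.strip().split("\n")
--     packages: dict[str, str] = {}
--
--     for line in lines:
--         if not line.strip() or line.startswith("#"):
--             continue
--
--         # Extract package name (handle both regular and URL-based packages)
--         # Format: "package==version" or "package @ url"
--         package_name = line.split("==")[0].split(" @ ")[0].strip()
--
--         if package_name not in packages: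
--             packages[package_name] = line
--         else:
--             existing = packages[package_name]
--             # Check if either line has a git URL with commit hash (@<hash>)
--             # Prefer: git+...@<commit_hash> over git+...@<branch> over git+...
--             if " @ git+" in line and " @ git+" in existing:
--                 # Both are git URLs, prefer the one with what looks like a commit hash
--                 # Commit hashes are typically 40 chars, branches are shorter
--                 line_ref = (
--                     line.split("@")[-1] if "@" in line.split(" @ git+")[-1] else ""
--                 )
--                 existing_ref = (
--                     existing.split("@")[-1]
--                     if "@" in existing.split(" @ git+")[-1]
--                     else ""
--                 )
--
--                 if len(line_ref) > len(existing_ref):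
--                     packages[package_name] = line
--             elif " @ git+" in line:
--                 # New line is git URL, existing is not - prefer git URL
--                 packages[package_name] = line
--
--     return "\n".join(packages.values()) + "\n"
-- ===== SOURCE B (Python) =====
-- def _deduplicate_freeze_requirements(freeze_output: str) -> str:
--     """Deduplicate package entries in freeze output, keeping the most specific URL."""
--     groups: dict[str, list[str]] = {}
--     for line in freeze_output.strip().split("\n"):
--         if not line.strip() or line.startswith("#"):
--             continue
--         name = line.split("==")[0].split(" @ ")[0].strip()
--         groups.setdefault(name, []).append(line)
--
--     def specificity(line: str) -> int:
--         # -1: not a git URL; otherwise the length of the trailing @<ref>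
--         # (commit hashes are longer than branch names), 0 if no ref.
--         if " @ git+" not in line:
--             return -1
--         if "@" not in line.split(" @ git+")[-1]:
--             return 0
--         return len(line.split("@")[-1])
--
--     # max keeps the first maximal line, matching "earliest wins on ties"
--     return "\n".join(max(lines, key=specificity) for lines in groups.values()) + "\n"
-- ===== Notes on version B (the rewrite author's own statement) =====
-- stated objective: alternative
-- what changed: Replaces A's single fold that compares each new line against a best-so-far dict entry with a two-pass decomposition: first group kept lines by package name, then select each group's winner with a first-maximal max over an integer specificity key (-1 non-git, else length of the trailing @ref).
import Mathlib
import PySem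

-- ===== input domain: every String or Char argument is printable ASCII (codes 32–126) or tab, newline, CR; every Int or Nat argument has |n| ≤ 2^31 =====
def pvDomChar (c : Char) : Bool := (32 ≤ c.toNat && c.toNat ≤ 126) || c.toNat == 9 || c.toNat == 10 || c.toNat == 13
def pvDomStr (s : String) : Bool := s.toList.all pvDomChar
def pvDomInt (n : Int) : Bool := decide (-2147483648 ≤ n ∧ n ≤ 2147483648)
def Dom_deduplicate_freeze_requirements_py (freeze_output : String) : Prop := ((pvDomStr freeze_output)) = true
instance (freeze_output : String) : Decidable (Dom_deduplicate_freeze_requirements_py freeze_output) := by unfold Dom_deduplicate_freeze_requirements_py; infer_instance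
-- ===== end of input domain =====

-- B is a two-pass rewrite (group lines by package name, then pick each group's best line with a
-- first-maximal max over an integer specificity key) instead of A's single fold that rewrites a
-- best-so-far dict; same output, different decomposition (objective: alternative, no speed claim).

-- shared primitive: Python's s.split(sep) for a non-empty literal sep
def pvSplit (s sep : String) : List String := (PySem.Str.split? s sep).getD [s]

-- ===== PORT A =====
def pvStepA (packages : PySem.Dict String String) (line : String) : PySem.Dict String String :=
  if PySem.Str.strip line == "" || PySem.Str.startswith line "#" then packages
  else
    let package_name := PySem.Str.strip ((pvSplit ((pvSplit line "==").headD "") " @ ").headD "")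
    if packages.contains package_name = false then
      packages.insert package_name line
    else
      let existing := packages.getD package_name ""
      if PySem.Str.isIn " @ git+" line && PySem.Str.isIn " @ git+" existing then
        let line_ref := if PySem.Str.isIn "@" ((pvSplit line " @ git+").getLastD "") then (pvSplit line "@").getLastD "" else ""
        let existing_ref := if PySem.Str.isIn "@" ((pvSplit existing " @ git+").getLastD "") then (pvSplit existing "@").getLastD "" else ""
        if PySem.Str.len existing_ref < PySem.Str.len line_ref then packages.insert package_name line else packages
      else if PySem.Str.isIn " @ git+" line then packages.insert package_name line
      else packages

def deduplicate_freeze_requirements_py (freeze_output : String) : String :=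
  PySem.Str.join "\n" ((pvSplit (PySem.Str.strip freeze_output) "\n").foldl pvStepA PySem.Dict.empty).values ++ "\n"

-- ===== PORT B =====
def pvSkip (line : String) : Bool :=
  PySem.Str.strip line == "" || PySem.Str.startswith line "#"

def pvName (line : String) : String :=
  PySem.Str.strip ((pvSplit ((pvSplit line "==").headD "") " @ ").headD "")

def pvSpecificity (line : String) : Int :=
  if PySem.Str.isIn " @ git+" line = false then -1
  else if PySem.Str.isIn "@" ((pvSplit line " @ git+").getLastD "") = false then 0
  else PySem.Str.len ((pvSplit line "@").getLastD "")

def pvStepB (groups : PySem.Dict String (List String)) (line : String) : PySem.Dict String (List String) :=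
  if pvSkip line then groups else groups.modify (pvName line) [] (· ++ [line])

def deduplicate_freeze_requirements_py_alt (freeze_output : String) : String :=
  let groups := (pvSplit (PySem.Str.strip freeze_output) "\n").foldl pvStepB PySem.Dict.empty
  PySem.Str.join "\n" (groups.values.map (fun lines => PySem.List.maxD lines pvSpecificity "")) ++ "\n"

-- ===== PRECONDITION & SPEC =====
def Spec_deduplicate_freeze_requirements_py (freeze_output : String) (out : String) : Prop := out = deduplicate_freeze_requirements_py_alt freeze_output
instance (freeze_output : String) (out : String) : Decidable (Spec_deduplicate_freeze_requirements_py freeze_output out) := by unfold Spec_deduplicate_freeze_requirements_py; infer_instance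

-- ===== CLAIM (what is proved, stated in full; the proofs are below) =====
def Claim_equal_deduplicate_freeze_requirements_py : Prop := ∀ (freeze_output : String), Dom_deduplicate_freeze_requirements_py freeze_output → Spec_deduplicate_freeze_requirements_py freeze_output (deduplicate_freeze_requirements_py freeze_output)

-- ===== LEMMAS AND PROOFS =====

-- proof-side helpers
def pvRef (l : String) : String :=
  if PySem.Str.isIn "@" ((pvSplit l " @ git+").getLastD "") then (pvSplit l "@").getLastD "" else ""

def pvBest (e l : String) : String :=
  if pvSpecificity e < pvSpecificity l then l else e

def pvMaxStep (acc : Option String) (x : String) : Option String :=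
  match acc with
  | none => some x
  | some m => if pvSpecificity m < pvSpecificity x then some x else some m

-- the invariant tying A's best-so-far dict to B's groups dict
def pvRel (dA : PySem.Dict String String) (dG : PySem.Dict String (List String)) : Prop :=
  dA.items = dG.items.map (fun p => (p.1, PySem.List.maxD p.2 pvSpecificity "")) ∧
  (dG.items.map (fun p => p.1)).Nodup ∧
  ∀ p ∈ dG.items, p.2 ≠ []

lemma pv_max?_eq (ls : List String) : PySem.List.max? ls pvSpecificity = ls.foldl pvMaxStep none := by
  simp only [PySem.List.max?]
  apply PySem.List.foldl_congr_mem
  intro acc x _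
  cases acc <;> rfl

lemma pv_foldl_some (ys : List String) (m : String) :
    ∃ m', List.foldl pvMaxStep (some m) ys = some m' := by
  induction ys generalizing m with
  | nil => exact ⟨m, rfl⟩
  | cons y ys ih =>
      simp only [List.foldl_cons, pvMaxStep]
      split_ifs <;> exact ih _

lemma pv_maxD_append (ls : List String) (x : String) (hne : ls ≠ []) :
    PySem.List.maxD (ls ++ [x]) pvSpecificity "" =
      pvBest (PySem.List.maxD ls pvSpecificity "") x := by
  cases ls with
  | nil => exact absurd rfl hne
  | cons y ys =>
      unfold PySem.List.maxD
      rw [pv_max?_eq, pv_max?_eq]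
      have h0 : pvMaxStep none y = some y := rfl
      simp only [List.cons_append, List.foldl_cons, h0, List.foldl_append]
      obtain ⟨m, hm⟩ := pv_foldl_some ys y
      rw [hm]
      simp only [List.foldl_nil, pvMaxStep, Option.getD_some, pvBest]
      split_ifs <;> rfl

lemma pv_len_nonneg (s : String) : 0 ≤ PySem.Str.len s := by
  have h := PySem.Str.len_eq s
  omega

lemma pv_spec_nongit {l : String} (h : PySem.Str.isIn " @ git+" l = false) :
    pvSpecificity l = -1 := by
  unfold pvSpecificity
  rw [h, if_pos rfl]

lemma pv_spec_git {l : String} (h : PySem.Str.isIn " @ git+" l = true) :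
    pvSpecificity l = PySem.Str.len (pvRef l) := by
  unfold pvSpecificity pvRef
  rw [h, if_neg (by simp)]
  by_cases h2 : PySem.Str.isIn "@" ((pvSplit l " @ git+").getLastD "") = true
  · rw [if_neg (by intro hcontra; rw [h2] at hcontra; simp at hcontra), if_pos h2]
  · have h2' : PySem.Str.isIn "@" ((pvSplit l " @ git+").getLastD "") = false := by
      simpa using h2
    rw [if_pos h2', if_neg h2]
    decide

lemma pv_neg_one_le_spec (l : String) : -1 ≤ pvSpecificity l := by
  unfold pvSpecificity
  split_ifs
  · omega
  · omega
  · exact le_trans (by omega) (pv_len_nonneg _)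

lemma pv_unique_key {α : Type} {l : List (String × α)} (hnd : (l.map (fun p => p.1)).Nodup)
    {p q : String × α} (hp : p ∈ l) (hq : q ∈ l) (h : p.1 = q.1) : p = q :=
  List.inj_on_of_nodup_map hnd hp hq h

lemma pv_contains_eq {dA : PySem.Dict String String} {dG : PySem.Dict String (List String)}
    (h : dA.items = dG.items.map (fun p => (p.1, PySem.List.maxD p.2 pvSpecificity ""))) (n : String) :
    dA.contains n = dG.contains n := by
  simp only [PySem.Dict.contains, h, List.any_map]
  rfl

lemma pv_find_of_mem {α : Type} {l : List (String × α)} (hnd : (l.map (fun p => p.1)).Nodup)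
    {p : String × α} (hp : p ∈ l) : l.find? (fun q => q.1 == p.1) = some p := by
  cases hfind : l.find? (fun q => q.1 == p.1) with
  | none =>
      have := List.find?_eq_none.mp hfind p hp
      simp at this
  | some q =>
      have hqmem := List.mem_of_find?_eq_some hfind
      have hqkey : q.1 = p.1 := by
        have := List.find?_some hfind
        simpa using this
      rw [List.inj_on_of_nodup_map hnd hqmem hp hqkey]

lemma pv_map_self {dA : PySem.Dict String String}
    {n v : String} (hv : ∀ q ∈ dA.items, q.1 = n → q = (n, v)) :
    dA.items = dA.items.map (fun q => if q.1 == n then (n, v) else q) := by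
  symm
  have hid : ∀ q ∈ dA.items, (if q.1 == n then ((n : String), v) else q) = q := by
    intro q hq
    by_cases hq1 : q.1 = n
    · rw [hv q hq hq1]
      simp
    · simp [hq1]
  rw [List.map_congr_left hid]
  simp

lemma pv_step (line : String) (dA : PySem.Dict String String) (dG : PySem.Dict String (List String))
    (h : pvRel dA dG) : pvRel (pvStepA dA line) (pvStepB dG line) := by
  obtain ⟨hit, hnd, hne⟩ := h
  by_cases hs : pvSkip line = true
  · have hs' : (PySem.Str.strip line == "" || PySem.Str.startswith line "#") = true := hs
    refine ⟨?_, ?_, ?_⟩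
    · simp only [pvStepA, pvStepB]
      rw [if_pos hs', if_pos hs]
      exact hit
    · simp only [pvStepB]
      rw [if_pos hs]
      exact hnd
    · simp only [pvStepB]
      rw [if_pos hs]
      exact hne
  · have hs' : ¬ ((PySem.Str.strip line == "" || PySem.Str.startswith line "#") = true) := hs
    obtain ⟨n, hn⟩ : ∃ n, pvName line = n := ⟨_, rfl⟩
    have hname : PySem.Str.strip ((pvSplit ((pvSplit line "==").headD "") " @ ").headD "") = n := hn
    have hndA : (dA.items.map (fun p => p.1)).Nodup := by
      rw [hit, List.map_map]
      exact hnd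
    by_cases hc : dG.contains n = true
    · -- existing entry: A overwrites in place with the better line, B appends to its group
      have hcA : dA.contains n = true := by rw [pv_contains_eq hit]; exact hc
      have hfound : (dG.items.find? (fun p => p.1 == n)).isSome := by
        rw [List.find?_isSome]
        simpa [PySem.Dict.contains, List.any_eq_true] using hc
      obtain ⟨p0, hfind⟩ := Option.isSome_iff_exists.mp hfound
      have hk1 : p0.1 = n := by simpa using List.find?_some hfind
      have hmemG : p0 ∈ dG.items := List.mem_of_find?_eq_some hfind
      have hlsne : p0.2 ≠ [] := hne _ hmemG
      have hgetG : dG.getD n [] = p0.2 := by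
        simp only [PySem.Dict.getD, PySem.Dict.get?, hfind, Option.map_some, Option.getD_some]
      have hfindA : dA.items.find? (fun q => q.1 == n) = some (p0.1, PySem.List.maxD p0.2 pvSpecificity "") := by
        rw [hit, List.find?_map]
        have h1 : dG.items.find? ((fun (q : String × String) => q.1 == n) ∘ (fun p => (p.1, PySem.List.maxD p.2 pvSpecificity ""))) = some p0 := hfind
        rw [h1]
        rfl
      have hgetA : dA.getD n "" = PySem.List.maxD p0.2 pvSpecificity "" := by
        simp only [PySem.Dict.getD, PySem.Dict.get?, hfindA, Option.map_some, Option.getD_some]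
      have huniqA : ∀ q ∈ dA.items, q.1 = n → q = (n, PySem.List.maxD p0.2 pvSpecificity "") := by
        intro q hq hq1
        have hfq : dA.items.find? (fun r => r.1 == q.1) = some q := pv_find_of_mem hndA hq
        rw [hq1] at hfq
        have hqe : q = (p0.1, PySem.List.maxD p0.2 pvSpecificity "") := Option.some.inj (hfq.symm.trans hfindA)
        rw [hqe, hk1]
      have hstepA : (pvStepA dA line).items =
          dA.items.map (fun q => if q.1 == n then (n, pvBest (PySem.List.maxD p0.2 pvSpecificity "") line) else q) := by
        simp only [pvStepA]
        rw [if_neg hs', hname, if_neg (by rw [hcA]; simp), hgetA]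
        by_cases h1 : (PySem.Str.isIn " @ git+" line && PySem.Str.isIn " @ git+" (PySem.List.maxD p0.2 pvSpecificity "")) = true
        · have h1' := h1
          rw [Bool.and_eq_true] at h1'
          obtain ⟨hlg, heg⟩ := h1'
          rw [if_pos h1]
          by_cases h2 : PySem.Str.len (if PySem.Str.isIn "@" ((pvSplit (PySem.List.maxD p0.2 pvSpecificity "") " @ git+").getLastD "") then (pvSplit (PySem.List.maxD p0.2 pvSpecificity "") "@").getLastD "" else "") <
              PySem.Str.len (if PySem.Str.isIn "@" ((pvSplit line " @ git+").getLastD "") then (pvSplit line "@").getLastD "" else "")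
          · rw [if_pos h2]
            have hb : pvBest (PySem.List.maxD p0.2 pvSpecificity "") line = line := by
              unfold pvBest
              rw [pv_spec_git heg, pv_spec_git hlg]
              simp only [pvRef]
              rw [if_pos h2]
            rw [hb]
            simp only [PySem.Dict.insert]
            rw [if_pos hcA]
          · rw [if_neg h2]
            have hb : pvBest (PySem.List.maxD p0.2 pvSpecificity "") line = PySem.List.maxD p0.2 pvSpecificity "" := by
              unfold pvBest
              rw [pv_spec_git heg, pv_spec_git hlg]
              simp only [pvRef]
              rw [if_neg h2]
            rw [hb]
            exact pv_map_self huniqA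
        · rw [if_neg h1]
          by_cases h3 : PySem.Str.isIn " @ git+" line = true
          · rw [if_pos h3]
            have heg : PySem.Str.isIn " @ git+" (PySem.List.maxD p0.2 pvSpecificity "") = false := by
              cases hB : PySem.Str.isIn " @ git+" (PySem.List.maxD p0.2 pvSpecificity "")
              · rfl
              · exact absurd (by rw [Bool.and_eq_true]; exact ⟨h3, hB⟩) h1
            have hb : pvBest (PySem.List.maxD p0.2 pvSpecificity "") line = line := by
              unfold pvBest
              rw [pv_spec_nongit heg, pv_spec_git h3]
              rw [if_pos (lt_of_lt_of_le (by omega) (pv_len_nonneg _))]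
            rw [hb]
            simp only [PySem.Dict.insert]
            rw [if_pos hcA]
          · rw [if_neg h3]
            have h3' : PySem.Str.isIn " @ git+" line = false := by
              cases hB : PySem.Str.isIn " @ git+" line
              · rfl
              · exact absurd hB h3
            have hb : pvBest (PySem.List.maxD p0.2 pvSpecificity "") line = PySem.List.maxD p0.2 pvSpecificity "" := by
              unfold pvBest
              rw [pv_spec_nongit h3']
              rw [if_neg (by have := pv_neg_one_le_spec (PySem.List.maxD p0.2 pvSpecificity ""); omega)]
            rw [hb]
            exact pv_map_self huniqA
      have hstepB : (pvStepB dG line).items =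
          dG.items.map (fun q => if q.1 == n then (n, p0.2 ++ [line]) else q) := by
        simp only [pvStepB]
        rw [if_neg hs, hn]
        simp only [PySem.Dict.modify]
        rw [hgetG]
        simp only [PySem.Dict.insert]
        rw [if_pos hc]
      refine ⟨?_, ?_, ?_⟩
      · rw [hstepA, hstepB, hit, List.map_map, List.map_map]
        apply List.map_congr_left
        intro q hq
        by_cases hq1 : q.1 = n
        · have hqe : q = p0 := pv_unique_key hnd hq hmemG (by rw [hq1, hk1])
          subst hqe
          simp only [Function.comp_apply, hk1, beq_self_eq_true, if_true]
          rw [pv_maxD_append _ _ hlsne]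
        · simp [Function.comp_apply, hq1]
      · rw [hstepB, List.map_map]
        have hcomp : ((fun p => p.1) ∘ fun q => if q.1 == n then ((n : String), p0.2 ++ [line]) else q) =
            (fun q : String × List String => q.1) := by
          funext q
          by_cases hq1 : q.1 = n <;> simp [Function.comp_apply, hq1]
        rw [hcomp]
        exact hnd
      · rw [hstepB]
        intro q hq
        obtain ⟨r, hr, hre⟩ := List.mem_map.mp hq
        by_cases hr1 : r.1 = n
        · rw [← hre]
          simp [hr1]
        · rw [← hre]
          simp only [beq_eq_false_iff_ne.mpr hr1, Bool.false_eq_true, if_false]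
          exact hne _ hr
    · -- fresh key: both dicts append a new entry
      have hc' : dG.contains n = false := by
        cases hB : dG.contains n
        · rfl
        · exact absurd hB hc
      have hcA : dA.contains n = false := by rw [pv_contains_eq hit]; exact hc'
      have hnotin : ∀ p ∈ dG.items, ¬ p.1 = n := by
        have h' := hc'
        simp only [PySem.Dict.contains] at h'
        intro p hp
        have := List.any_eq_false.mp h' p hp
        simpa using this
      have hfindG : dG.items.find? (fun p => p.1 == n) = none := by
        rw [List.find?_eq_none]
        intro p hp
        simp [hnotin p hp]
      have hgetG : dG.getD n [] = [] := by
        simp only [PySem.Dict.getD, PySem.Dict.get?, hfindG, Option.map_none, Option.getD_none]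
      have hstepA : (pvStepA dA line).items = dA.items ++ [(n, line)] := by
        simp only [pvStepA]
        rw [if_neg hs', hname, if_pos hcA]
        simp only [PySem.Dict.insert]
        rw [if_neg (by rw [hcA]; simp)]
      have hstepB : (pvStepB dG line).items = dG.items ++ [(n, [line])] := by
        simp only [pvStepB]
        rw [if_neg hs, hn]
        simp only [PySem.Dict.modify]
        rw [hgetG]
        simp only [PySem.Dict.insert, List.nil_append]
        rw [if_neg (by rw [hc']; simp)]
      refine ⟨?_, ?_, ?_⟩
      · rw [hstepA, hstepB, List.map_append, hit]
        rfl
      · rw [hstepB, List.map_append]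
        rw [List.nodup_append]
        refine ⟨hnd, by simp, ?_⟩
        intro a ha b hb
        have hb' : b = n := by simpa using hb
        subst hb'
        obtain ⟨p, hp, hpe⟩ := List.mem_map.mp ha
        exact fun hEq => hnotin p hp (hpe.trans hEq)
      · rw [hstepB]
        intro q hq
        rcases List.mem_append.mp hq with hmem | hmem
        · exact hne _ hmem
        · simp only [List.mem_singleton] at hmem
          rw [hmem]
          simp

lemma pv_fold (lines : List String) (dA : PySem.Dict String String) (dG : PySem.Dict String (List String))
    (h : pvRel dA dG) : pvRel (lines.foldl pvStepA dA) (lines.foldl pvStepB dG) := by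
  induction lines generalizing dA dG with
  | nil => exact h
  | cons x xs ih => exact ih _ _ (pv_step x dA dG h)

-- ===== VERDICT (by name: the statement is the Claim_ definition above) =====
theorem deduplicate_freeze_requirements_py_spec : Claim_equal_deduplicate_freeze_requirements_py := by
  intro s _
  unfold Spec_deduplicate_freeze_requirements_py
  simp only [deduplicate_freeze_requirements_py, deduplicate_freeze_requirements_py_alt]
  have h0 : pvRel PySem.Dict.empty PySem.Dict.empty := by
    refine ⟨rfl, ?_, ?_⟩ <;> simp [PySem.Dict.empty]
  obtain ⟨hit, -, -⟩ := pv_fold (pvSplit (PySem.Str.strip s) "\n") _ _ h0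
  simp only [PySem.Dict.values, hit, List.map_map]
  rfl
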